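-- pv_equiv track=rewrite | github.com/VuLAb22cn/AnhVu.github | Lap_trinh_Python/Code_PTIT/DoanNhoHon.py | demSo
-- ===== SOURCE A (Python) =====
-- def demSo(a):
--     n = len(a)
--     s = [0] * n
--     stack = []
--     for i in range(n):
--         while stack and a[stack[-1]] <= a[i]:
--             stack.pop()
--         if not stack:
--             s[i] = i + 1
--         else:
--             s[i] = i - stack[-1]
--         stack.append(i)
--
--     return s
-- ===== SOURCE B (Python) =====
-- def demSo(a):
--     n = len(a)
--     s = [0] * n
--     for i in range(n):
--         span = 1
--         p = i - 1
--         while p >= 0 and a[p] <= a[i]: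
--             span += s[p]
--             p -= s[p]
--         s[i] = span
--     return s
-- ===== Notes on version B (the rewrite author's own statement) =====
-- stated objective: alternative
-- what changed: Replaces the explicit index stack with backward jumps through the result array itself: for each i it walks p from i-1 skipping whole spans (p -= s[p]) while a[p] <= a[i], so no auxiliary stack is kept.
import Mathlib
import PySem

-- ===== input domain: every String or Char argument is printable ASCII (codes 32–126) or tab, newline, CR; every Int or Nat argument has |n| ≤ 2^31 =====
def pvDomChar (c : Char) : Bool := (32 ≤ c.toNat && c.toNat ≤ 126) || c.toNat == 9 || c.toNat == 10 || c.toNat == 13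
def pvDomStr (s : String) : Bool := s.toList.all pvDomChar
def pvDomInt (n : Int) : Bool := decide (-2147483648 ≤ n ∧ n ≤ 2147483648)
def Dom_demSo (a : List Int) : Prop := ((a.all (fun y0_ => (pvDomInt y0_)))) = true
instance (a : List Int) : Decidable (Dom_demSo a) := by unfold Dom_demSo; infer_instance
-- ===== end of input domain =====

-- B drops A's explicit index stack and instead walks backwards through the result
-- array itself, skipping whole spans (p -= s[p]); same O(n) cost, different structure.

-- ===== PORT A =====
-- the inner `while stack and a[stack[-1]] <= a[i]: stack.pop()` loop
def popA (a : List Int) (ai : Int) : List Int → List Int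
  | [] => []
  | t :: rest => if PySem.List.pyGetD a t 0 ≤ ai then popA a ai rest else t :: rest

-- one iteration of A's for-loop; the stack is kept head-first (head = Python's stack[-1])
def stepA (a : List Int) (st : List Int × List Int) (i : Int) : List Int × List Int :=
  let stack := popA a (PySem.List.pyGetD a i 0) st.2
  let s := if stack = [] then st.1.set i.toNat (i + 1)
           else st.1.set i.toNat (i - stack.headD 0)
  (s, i :: stack)

def demSo (a : List Int) : List Int :=
  ((PySem.List.pyRange 0 (a.length : Int)).foldl (stepA a)
    (List.replicate a.length 0, [])).1

-- ===== PORT B =====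
-- the inner `while p >= 0 and a[p] <= a[i]: span += s[p]; p -= s[p]` loop;
-- the fuel argument only makes the recursion total (p strictly decreases each step,
-- so fuel i+1 is never exhausted)
def skipB (a s : List Int) (ai : Int) : Nat → Int → Int → Int
  | 0, span, _ => span
  | fuel+1, span, p =>
    if 0 ≤ p ∧ PySem.List.pyGetD a p 0 ≤ ai then
      skipB a s ai fuel (span + PySem.List.pyGetD s p 0) (p - PySem.List.pyGetD s p 0)
    else span

-- one iteration of B's for-loop
def stepB (a : List Int) (s : List Int) (i : Int) : List Int :=
  s.set i.toNat (skipB a s (PySem.List.pyGetD a i 0) (i.toNat + 1) 1 (i - 1))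

def demSo_alt (a : List Int) : List Int :=
  (PySem.List.pyRange 0 (a.length : Int)).foldl (stepB a) (List.replicate a.length 0)

-- ===== PRECONDITION & SPEC =====
def Spec_demSo (a : List Int) (out : List Int) : Prop := out = demSo_alt a
instance (a : List Int) (out : List Int) : Decidable (Spec_demSo a out) := by
  unfold Spec_demSo; infer_instance

-- ===== CLAIM (what is proved, stated in full; the proofs are below) =====
def Claim_equal_demSo : Prop := ∀ (a : List Int), Dom_demSo a → Spec_demSo a (demSo a)

-- ===== LEMMAS AND PROOFS =====

-- `Chain s p st` : A's stack `st` (head-first, top index p) is exactly the backward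
-- jump chain stored in the result array s: each next stack entry is p - s[p], and the
-- chain bottoms out at pointer -1 with the empty stack.
inductive Chain (s : List Int) : Int → List Int → Prop
  | nil : Chain s (-1) []
  | cons (p : Int) (rest : List Int) (h0 : 0 ≤ p) (h1 : 1 ≤ PySem.List.pyGetD s p 0)
      (hr : Chain s (p - PySem.List.pyGetD s p 0) rest) : Chain s p (p :: rest)

lemma chain_stable {s s' : List Int} {p : Int} {st : List Int}
    (h : Chain s p st)
    (hst : ∀ j : Int, 0 ≤ j → j ≤ p → PySem.List.pyGetD s' j 0 = PySem.List.pyGetD s j 0) :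
    Chain s' p st := by
  induction h with
  | nil => exact .nil
  | cons p rest h0 h1 hr ih =>
    have he : PySem.List.pyGetD s' p 0 = PySem.List.pyGetD s p 0 := hst p h0 le_rfl
    refine .cons p rest h0 (he ▸ h1) ?_
    rw [he]
    exact ih (fun j hj hjp => hst j hj (by omega))

-- pyGetD at a nonnegative index is unaffected by setting a different index
lemma getd_set_ne (s : List Int) (v : Int) (k : Nat) (j : Int)
    (hj : 0 ≤ j) (hne : j ≠ (k : Int)) :
    PySem.List.pyGetD (s.set k v) j 0 = PySem.List.pyGetD s j 0 := by
  obtain ⟨m, rfl⟩ := Int.eq_ofNat_of_zero_le hj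
  rw [PySem.List.pyGetD_natCast, PySem.List.pyGetD_natCast]
  have hmk : m ≠ k := by exact_mod_cast hne
  simp [List.getD, List.getElem?_set_ne (Ne.symm hmk)]

lemma getd_set_self (s : List Int) (v : Int) (k : Nat) (hk : k < s.length) :
    PySem.List.pyGetD (s.set k v) (k : Int) 0 = v := by
  rw [PySem.List.pyGetD_natCast]
  simp [List.getD, hk]

-- inner-loop correspondence: A's pop loop and B's skip walk traverse the same chain
lemma loop_corr (a : List Int) (ai : Int) :
    ∀ {s : List Int} {p : Int} {st : List Int}, Chain s p st →
    ∀ (span : Int) (fuel : Nat), p < (fuel : Int) →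
      skipB a s ai fuel span p = span + (p - (popA a ai st).headD (-1))
      ∧ Chain s ((popA a ai st).headD (-1)) (popA a ai st)
      ∧ (popA a ai st).headD (-1) ≤ p := by
  intro s p st h
  induction h with
  | nil =>
    intro span fuel _
    refine ⟨?_, by exact .nil, le_rfl⟩
    cases fuel with
    | zero => simp [skipB, popA]
    | succ f => simp [skipB, popA]
  | cons p rest h0 h1 hr ih =>
    intro span fuel hfuel
    cases fuel with
    | zero => omega
    | succ f =>
      by_cases hc : PySem.List.pyGetD a p 0 ≤ ai
      · have hstep : popA a ai (p :: rest) = popA a ai rest := by simp [popA, hc]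
        have hf : p - PySem.List.pyGetD s p 0 < (f : Int) := by
          push_cast at hfuel ⊢; omega
        obtain ⟨e1, e2, e3⟩ := ih (span + PySem.List.pyGetD s p 0) f hf
        refine ⟨?_, by rwa [hstep], by rw [hstep]; omega⟩
        rw [hstep, show skipB a s ai (f+1) span p
            = skipB a s ai f (span + PySem.List.pyGetD s p 0) (p - PySem.List.pyGetD s p 0)
          from by simp [skipB, h0, hc], e1]
        ring
      · have hstep : popA a ai (p :: rest) = p :: rest := by simp [popA, hc]
        refine ⟨?_, ?_, ?_⟩
        · rw [hstep, show skipB a s ai (f+1) span p = span from by simp [skipB, hc]]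
          simp
        · rw [hstep]; exact .cons p rest h0 h1 hr
        · rw [hstep]; simp
      
-- outer-loop invariant: after the first k iterations A's s equals B's s, its length is
-- unchanged, and A's stack is the chain with top pointer k-1
lemma invariant (a : List Int) : ∀ k, k ≤ a.length →
    (((PySem.List.pyRange 0 (k : Int)).foldl (stepA a) (List.replicate a.length 0, [])).1
      = (PySem.List.pyRange 0 (k : Int)).foldl (stepB a) (List.replicate a.length 0))
    ∧ (((PySem.List.pyRange 0 (k : Int)).foldl (stepA a) (List.replicate a.length 0, [])).1.length
      = a.length)
    ∧ Chain (((PySem.List.pyRange 0 (k : Int)).foldl (stepA a) (List.replicate a.length 0, [])).1)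
        ((k : Int) - 1)
        (((PySem.List.pyRange 0 (k : Int)).foldl (stepA a) (List.replicate a.length 0, [])).2) := by
  intro k
  induction k with
  | zero =>
    intro _
    refine ⟨by simp [PySem.List.pyRange], by simp [PySem.List.pyRange], ?_⟩
    simp only [PySem.List.pyRange]
    exact .nil
  | succ k ih =>
    intro hk
    obtain ⟨hAB, hlen, hch⟩ := ih (by omega)
    have hsplit : PySem.List.pyRange 0 ((k+1 : Nat) : Int)
        = PySem.List.pyRange 0 (k : Int) ++ [(k : Int)] := by
      have h1 : ((k+1 : Nat) : Int) = (k : Int) + 1 := by push_cast; ring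
      rw [h1, PySem.List.pyRange_one_succ_right (by positivity)]
    set s := ((PySem.List.pyRange 0 (k : Int)).foldl (stepA a) (List.replicate a.length 0, [])).1 with hs
    set stack := ((PySem.List.pyRange 0 (k : Int)).foldl (stepA a) (List.replicate a.length 0, [])).2 with hstk
    have hpair : (PySem.List.pyRange 0 (k : Int)).foldl (stepA a) (List.replicate a.length 0, [])
        = (s, stack) := rfl
    obtain ⟨e1, e2, e3⟩ := loop_corr a (PySem.List.pyGetD a (k : Int) 0) hch 1 (k + 1)
      (by push_cast; omega)
    generalize hstk2 : popA a (PySem.List.pyGetD a (k : Int) 0) stack = stack' at e1 e2 e3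
    generalize hpF : stack'.headD (-1) = pF at e1 e2 e3
    have hval : skipB a s (PySem.List.pyGetD a (k : Int) 0) (k + 1) 1 ((k : Int) - 1)
        = (k : Int) - pF := by rw [e1]; ring
    have hB : stepB a s (k : Int) = s.set k ((k : Int) - pF) := by
      simp only [stepB, Int.toNat_natCast]
      rw [hval]
    have hA1 : (stepA a (s, stack) (k : Int)).1 = s.set k ((k : Int) - pF) := by
      simp only [stepA, Int.toNat_natCast]
      rw [hstk2]
      rcases stack' with _ | ⟨q, t⟩
      · have hq : pF = -1 := by rw [← hpF]; rfl
        rw [hq]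
        simp
      · have hq : pF = q := by rw [← hpF]; rfl
        rw [hq]
        simp
    have hA2 : (stepA a (s, stack) (k : Int)).2 = (k : Int) :: stack' := by
      simp only [stepA]
      rw [hstk2]
    have hklen : k < s.length := by omega
    have hchainK : Chain (s.set k ((k : Int) - pF)) (k : Int) ((k : Int) :: stack') := by
      have hget : PySem.List.pyGetD (s.set k ((k : Int) - pF)) (k : Int) 0 = (k : Int) - pF :=
        getd_set_self s _ k hklen
      refine .cons (k : Int) stack' (by positivity) (by rw [hget]; omega) ?_
      rw [hget, show (k : Int) - ((k : Int) - pF) = pF from by ring]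
      refine chain_stable e2 (fun j hj hjp => ?_)
      exact getd_set_ne s _ k j hj (by omega)
    refine ⟨?_, ?_, ?_⟩
    · rw [hsplit, List.foldl_append, List.foldl_append, hpair, ← hAB]
      simp only [List.foldl_cons, List.foldl_nil]
      rw [hA1, hB]
    · rw [hsplit, List.foldl_append, hpair]
      simp only [List.foldl_cons, List.foldl_nil]
      rw [hA1]
      simp [hlen]
    · rw [hsplit, List.foldl_append, hpair]
      simp only [List.foldl_cons, List.foldl_nil]
      rw [hA1, hA2, show ((k+1 : Nat) : Int) - 1 = (k : Int) from by push_cast; ring]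
      exact hchainK

-- ===== VERDICT (by name: the statement is the Claim_ definition above) =====
theorem demSo_spec : Claim_equal_demSo := by
  intro a _
  unfold Spec_demSo demSo demSo_alt
  exact (invariant a a.length le_rfl).1
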